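-- pv_equiv track=rewrite | github.com/FoggyCaligo/MACHI | MK4/tools/response_runner.py | _merge_without_overlap
-- ===== SOURCE A (Python) =====
-- def _merge_without_overlap(prev: str, new: str, max_overlap: int = 160) -> str:
--     prev = (prev or "").rstrip()
--     new = (new or "").strip()
--     if not prev:
--         return new
--     if not new:
--         return prev
--
--     max_len = min(len(prev), len(new), max_overlap)
--     overlap = 0
--     for size in range(max_len, 19, -1):
--         if prev[-size:] == new[:size]:
--             overlap = size
--             break
--
--     if overlap:
--         new = new[overlap:].lstrip()
--
--     if not new:
--         return prev
--
--     return (prev + "\n\n" + new).strip()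
-- ===== SOURCE B (Python) =====
-- def _merge_without_overlap(prev: str, new: str, max_overlap: int = 160) -> str:
--     prev = (prev or "").rstrip()
--     new = (new or "").strip()
--     if not prev:
--         return new
--     if not new:
--         return prev
--
--     m = min(len(prev), len(new), max_overlap)
--     overlap = 0
--     if m >= 20:
--         # KMP: prefix-function of pat = new[:m], then run the matcher over
--         # tail = prev[-m:]; the final state is the longest k with
--         # prev[-k:] == new[:k], in O(m) instead of A's O(m^2).
--         pat = new[:m]
--         pf = [0] * m
--         k = 0
--         for i in range(1, m):
--             c = pat[i]
--             while k > 0 and pat[k] != c: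
--                 k = pf[k - 1]
--             if pat[k] == c:
--                 k += 1
--             pf[i] = k
--         q = 0
--         for c in prev[len(prev) - m:]:
--             while q > 0 and pat[q] != c:
--                 q = pf[q - 1]
--             if pat[q] == c:
--                 q += 1
--         if q >= 20:
--             overlap = q
--
--     if overlap:
--         new = new[overlap:].lstrip()
--
--     if not new:
--         return prev
--
--     return (prev + "\n\n" + new).strip()
-- ===== Notes on version B (the rewrite author's own statement) =====
-- stated objective: faster
-- what changed: Replaced A's descending trial loop (compare prev[-size:] == new[:size] for every candidate size) with a KMP prefix-function table plus a linear matcher scan over prev's tail that yields the longest suffix/prefix overlap in one pass; all surrounding normalization and splicing is unchanged.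
import Mathlib
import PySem

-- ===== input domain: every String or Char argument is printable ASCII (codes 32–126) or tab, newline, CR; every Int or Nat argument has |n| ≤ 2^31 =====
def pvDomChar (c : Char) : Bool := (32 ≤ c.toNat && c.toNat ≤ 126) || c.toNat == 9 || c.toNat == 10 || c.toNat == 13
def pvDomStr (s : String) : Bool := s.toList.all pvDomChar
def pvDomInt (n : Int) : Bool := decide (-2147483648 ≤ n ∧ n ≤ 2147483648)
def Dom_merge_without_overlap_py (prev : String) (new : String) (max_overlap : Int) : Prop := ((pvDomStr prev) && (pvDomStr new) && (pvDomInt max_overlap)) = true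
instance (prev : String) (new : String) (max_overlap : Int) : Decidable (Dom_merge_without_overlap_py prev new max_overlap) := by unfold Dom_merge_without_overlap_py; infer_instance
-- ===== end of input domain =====

-- B replaces A's quadratic descending trial loop (compare prev[-size:] == new[:size] for
-- each size) by a linear KMP prefix-function + matcher scan computing the longest overlap;
-- all surrounding normalization is unchanged.

-- ===== PORT A =====
-- 'for size in range(max_len, 19, -1): if prev[-size:] == new[:size]: overlap = size; break'
def pvALoop (p : String) (n : String) (size : Int) : Int :=
  if 20 ≤ size then
    (if PySem.Str.slice p (some (-size)) none = PySem.Str.slice n none (some size)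
     then size
     else pvALoop p n (size - 1))
  else 0
termination_by (size - 19).toNat
decreasing_by omega

def merge_without_overlap_py (prev : String) (new : String) (max_overlap : Int) : String :=
  let p := PySem.Str.rstrip prev
  let n := PySem.Str.strip new
  if p = "" then n
  else if n = "" then p
  else
    let max_len : Int := min (min (PySem.Str.len p) (PySem.Str.len n)) max_overlap
    let overlap : Int := pvALoop p n max_len
    let n2 : String := if overlap ≠ 0 then PySem.Str.lstrip (PySem.Str.slice n (some overlap) none) else n
    if n2 = "" then p
    else PySem.Str.strip (p ++ "\n\n" ++ n2)

-- ===== PORT B =====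
-- 'while k > 0 and pat[k] != c: k = pf[k-1]' — the 'min … (k-1)' is only a termination
-- guard: every prefix-function table satisfies pf[k-1] ≤ k-1, so it never changes the value.
def pvDescend (pat : List Char) (pf : List Nat) (c : Char) (k : Nat) : Nat :=
  if h : 0 < k ∧ pat.getD k ' ' ≠ c then
    pvDescend pat pf c (min (pf.getD (k - 1) 0) (k - 1))
  else k
termination_by k
decreasing_by omega

-- the shared KMP step: descend, then 'if pat[k] == c: k += 1'
def pvKmpStep (pat : List Char) (pf : List Nat) (k : Nat) (c : Char) : Nat :=
  let r := pvDescend pat pf c k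
  if pat.getD r ' ' = c then r + 1 else r

-- 'pf = [0]*m; k = 0; for i in range(1, m): …; pf[i] = k'  (entries built left to right)
def pvBuildPF (pat : List Char) : List Nat :=
  ((List.range (pat.length - 1)).foldl
    (fun st j =>
      let k := pvKmpStep pat st.1 st.2 (pat.getD (j + 1) ' ')
      (st.1 ++ [k], k))
    ([0], 0)).1

def merge_without_overlap_py_alt (prev : String) (new : String) (max_overlap : Int) : String :=
  let p := PySem.Str.rstrip prev
  let n := PySem.Str.strip new
  if p = "" then n
  else if n = "" then p
  else
    let m : Int := min (min (PySem.Str.len p) (PySem.Str.len n)) max_overlap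
    let overlap : Int :=
      if 20 ≤ m then
        let pat : List Char := (PySem.Str.slice n none (some m)).toList
        let pf : List Nat := pvBuildPF pat
        let q : Nat := (PySem.Str.slice p (some (PySem.Str.len p - m)) none).toList.foldl (pvKmpStep pat pf) 0
        if 20 ≤ q then (q : Int) else 0
      else 0
    let n2 : String := if overlap ≠ 0 then PySem.Str.lstrip (PySem.Str.slice n (some overlap) none) else n
    if n2 = "" then p
    else PySem.Str.strip (p ++ "\n\n" ++ n2)

-- ===== PRECONDITION & SPEC =====
def Spec_merge_without_overlap_py (prev : String) (new : String) (max_overlap : Int) (out : String) : Prop := out = merge_without_overlap_py_alt prev new max_overlap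
instance (prev : String) (new : String) (max_overlap : Int) (out : String) : Decidable (Spec_merge_without_overlap_py prev new max_overlap out) := by unfold Spec_merge_without_overlap_py; infer_instance

-- ===== CLAIM (what is proved, stated in full; the proofs are below) =====
def Claim_equal_merge_without_overlap_py : Prop := ∀ (prev : String) (new : String) (max_overlap : Int), Dom_merge_without_overlap_py prev new max_overlap → Spec_merge_without_overlap_py prev new max_overlap (merge_without_overlap_py prev new max_overlap)

-- ===== LEMMAS AND PROOFS =====

-- longest proper border of s (0 for s of length ≤ 1)
def pvPi (s : List Char) : Nat := Nat.findGreatest (fun k => s.take k <:+ s) (s.length - 1)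

theorem pv_suffix_snoc_snoc {l u : List Char} {a c : Char} :
    (l ++ [a]) <:+ (u ++ [c]) ↔ l <:+ u ∧ a = c := by
  rw [← List.reverse_prefix, List.reverse_append, List.reverse_append]
  simp only [List.reverse_singleton, List.singleton_append, List.cons_prefix_cons,
    List.reverse_prefix]
  exact ⟨fun h => ⟨h.2, h.1⟩, fun h => ⟨h.2, h.1⟩⟩

theorem pv_suffix_of_suffix_length_le {l₁ l₂ l₃ : List Char}
    (h₁ : l₁ <:+ l₃) (h₂ : l₂ <:+ l₃) (h : l₁.length ≤ l₂.length) : l₁ <:+ l₂ := by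
  rw [← List.reverse_prefix] at h₁ h₂ ⊢
  exact List.prefix_of_prefix_length_le h₁ h₂ (by simpa using h)

theorem pv_take_snoc {p : List Char} {k : Nat} (h : k < p.length) :
    p.take (k + 1) = p.take k ++ [p.getD k ' '] := by
  rw [List.take_add_one, List.getElem?_eq_getElem h, List.getD_eq_getElem p ' ' h]
  rfl

theorem pv_ext_iff {p u : List Char} {c : Char} {k : Nat} (h : k < p.length) :
    (p.take (k + 1) <:+ (u ++ [c])) ↔ (p.take k <:+ u ∧ p.getD k ' ' = c) := by
  rw [pv_take_snoc h, pv_suffix_snoc_snoc]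

theorem pv_nest {p w : List Char} {k q : Nat} (hkq : k ≤ q)
    (hk : p.take k <:+ w) (hq : p.take q <:+ w) : p.take k <:+ p.take q := by
  refine pv_suffix_of_suffix_length_le hk hq ?_
  simp only [List.length_take]
  omega

theorem pv_border_le_pi {p : List Char} {k q : Nat} (hkq : k < q) (hq : q ≤ p.length)
    (h : p.take k <:+ p.take q) : k ≤ pvPi (p.take q) := by
  unfold pvPi
  refine Nat.le_findGreatest ?_ ?_
  · simp only [List.length_take]
    omega
  · rw [List.take_take, Nat.min_eq_left (by omega)]
    exact h

theorem pv_pi_suffix (s : List Char) : s.take (pvPi s) <:+ s := by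
  exact Nat.findGreatest_spec (P := fun k => s.take k <:+ s) (Nat.zero_le _) (by simp)

theorem pv_pi_lt {s : List Char} (h : s ≠ []) : pvPi s < s.length := by
  have h1 : pvPi s ≤ s.length - 1 := Nat.findGreatest_le _
  have h2 : 0 < s.length := List.length_pos_of_ne_nil h
  omega

theorem pv_findGreatest_congr {P Q : Nat → Prop} [DecidablePred P] [DecidablePred Q]
    (n : Nat) (h : ∀ k, k ≤ n → (P k ↔ Q k)) : Nat.findGreatest P n = Nat.findGreatest Q n := by
  induction n with
  | zero => rfl
  | succ n ih =>
    rw [Nat.findGreatest_succ, Nat.findGreatest_succ]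
    have h1 := h (n + 1) le_rfl
    have h2 : Nat.findGreatest P n = Nat.findGreatest Q n :=
      ih (fun k hk => h k (Nat.le_succ_of_le hk))
    by_cases hp : P (n + 1)
    · rw [if_pos hp, if_pos (h1.mp hp)]
    · rw [if_neg hp, if_neg (fun hq => hp (h1.mpr hq)), h2]

theorem pvDescend_spec (pat : List Char) (pf : List Nat) (c : Char) (w : List Char) (B : Nat)
    (hB : B < pat.length)
    (hpf : ∀ i, i + 1 ≤ B → pf.getD i 0 = pvPi (pat.take (i + 1))) :
    ∀ q, q ≤ B → pat.take q <:+ w →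
      (∀ k, k ≤ B → pat.take k <:+ w → pat.getD k ' ' = c → k ≤ q) →
      (pvDescend pat pf c q ≤ q ∧ pat.take (pvDescend pat pf c q) <:+ w ∧
       (∀ k, k ≤ B → pat.take k <:+ w → pat.getD k ' ' = c → k ≤ pvDescend pat pf c q) ∧
       (pat.getD (pvDescend pat pf c q) ' ' ≠ c →
         pvDescend pat pf c q = 0 ∧ ∀ k, k ≤ B → pat.take k <:+ w → pat.getD k ' ' ≠ c)) := by
  intro q
  induction q using Nat.strong_induction_on with
  | _ q ih =>
    intro hqB hq hmax
    rw [pvDescend]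
    by_cases hcond : 0 < q ∧ pat.getD q ' ' ≠ c
    · rw [dif_pos hcond]
      obtain ⟨hq0, hne⟩ := hcond
      have hpfq : pf.getD (q - 1) 0 = pvPi (pat.take q) := by
        have h := hpf (q - 1) (by omega)
        have h' : q - 1 + 1 = q := by omega
        rw [h'] at h
        exact h
      have htlen : (pat.take q).length = q := by
        simp only [List.length_take]
        omega
      have hne' : pat.take q ≠ [] := by
        intro h0
        rw [h0] at htlen
        simp at htlen
        omega
      have hpilt : pvPi (pat.take q) < q := by
        have := pv_pi_lt hne'
        omega
      have hmin : min (pf.getD (q - 1) 0) (q - 1) = pvPi (pat.take q) := by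
        rw [hpfq]
        omega
      rw [hmin]
      have hq'suf : pat.take (pvPi (pat.take q)) <:+ w := by
        have h1 : (pat.take q).take (pvPi (pat.take q)) <:+ pat.take q := pv_pi_suffix _
        rw [List.take_take, Nat.min_eq_left (by omega)] at h1
        exact h1.trans hq
      have hmax' : ∀ k, k ≤ B → pat.take k <:+ w → pat.getD k ' ' = c → k ≤ pvPi (pat.take q) := by
        intro k hkB hksuf hkc
        have hkq : k ≤ q := hmax k hkB hksuf hkc
        have hkne : k ≠ q := by
          intro h
          rw [h] at hkc
          exact hne hkc
        exact pv_border_le_pi (by omega) (by omega) (pv_nest (by omega) hksuf hq)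
      obtain ⟨h1, h2, h3, h4⟩ := ih (pvPi (pat.take q)) (by omega) (by omega) hq'suf hmax'
      exact ⟨by omega, h2, h3, h4⟩
    · rw [dif_neg hcond]
      refine ⟨le_rfl, hq, hmax, ?_⟩
      intro hnec
      have hq0 : q = 0 := by
        by_contra h
        exact hcond ⟨by omega, hnec⟩
      refine ⟨hq0, ?_⟩
      intro k hkB hksuf hkc
      have : k ≤ q := hmax k hkB hksuf hkc
      rw [hq0] at this
      have hk0 : k = 0 := by omega
      rw [hk0, ← hq0] at hkc
      exact hnec hkc

theorem pvKmpStep_findGreatest (pat : List Char) (pf : List Nat) (c : Char) (w : List Char)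
    (B : Nat) (hB : B < pat.length)
    (hpf : ∀ i, i + 1 ≤ B → pf.getD i 0 = pvPi (pat.take (i + 1))) :
    pvKmpStep pat pf (Nat.findGreatest (fun k => pat.take k <:+ w) B) c
      = Nat.findGreatest (fun k => pat.take k <:+ (w ++ [c])) (B + 1) := by
  have hGB : Nat.findGreatest (fun k => pat.take k <:+ w) B ≤ B := Nat.findGreatest_le B
  have hGsuf : pat.take (Nat.findGreatest (fun k => pat.take k <:+ w) B) <:+ w :=
    Nat.findGreatest_spec (P := fun k => pat.take k <:+ w) (Nat.zero_le _) (by simp)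
  have hmax : ∀ k, k ≤ B → pat.take k <:+ w → pat.getD k ' ' = c →
      k ≤ Nat.findGreatest (fun k => pat.take k <:+ w) B :=
    fun k hk hsuf _ => Nat.le_findGreatest hk hsuf
  obtain ⟨hr1, hr2, hr3, hr4⟩ :=
    pvDescend_spec pat pf c w B hB hpf (Nat.findGreatest (fun k => pat.take k <:+ w) B)
      hGB hGsuf hmax
  unfold pvKmpStep
  set r := pvDescend pat pf c (Nat.findGreatest (fun k => pat.take k <:+ w) B) with hrdef
  have hrB : r ≤ B := le_trans hr1 hGB
  by_cases hc : pat.getD r ' ' = c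
  · rw [if_pos hc]
    have hp' : pat.take (r + 1) <:+ w ++ [c] := (pv_ext_iff (by omega)).mpr ⟨hr2, hc⟩
    have hge : r + 1 ≤ Nat.findGreatest (fun k => pat.take k <:+ (w ++ [c])) (B + 1) :=
      Nat.le_findGreatest (by omega) hp'
    have hle : Nat.findGreatest (fun k => pat.take k <:+ (w ++ [c])) (B + 1) ≤ r + 1 := by
      by_contra hlt
      push Not at hlt
      have hgB : Nat.findGreatest (fun k => pat.take k <:+ (w ++ [c])) (B + 1) ≤ B + 1 :=
        Nat.findGreatest_le _
      have hPg : pat.take (Nat.findGreatest (fun k => pat.take k <:+ (w ++ [c])) (B + 1)) <:+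
          (w ++ [c]) :=
        Nat.findGreatest_spec (P := fun k => pat.take k <:+ (w ++ [c])) (Nat.zero_le _) (by simp)
      set g := Nat.findGreatest (fun k => pat.take k <:+ (w ++ [c])) (B + 1) with hgdef
      have hgeq : g = (g - 1) + 1 := by omega
      rw [hgeq] at hPg
      obtain ⟨hsuf, hcg⟩ := (pv_ext_iff (by omega)).mp hPg
      have := hr3 (g - 1) (by omega) hsuf hcg
      omega
    omega
  · rw [if_neg hc]
    obtain ⟨hr0, hnom⟩ := hr4 hc
    rw [hr0]
    symm
    rw [Nat.findGreatest_eq_zero_iff]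
    intro k hk0 hkB hPk
    have hkeq : k = (k - 1) + 1 := by omega
    rw [hkeq] at hPk
    obtain ⟨hsuf, hkc⟩ := (pv_ext_iff (by omega)).mp hPk
    exact hnom (k - 1) (by omega) hsuf hkc

theorem pvScan_foldl (pat : List Char) (pf : List Nat)
    (hpf : ∀ i, i < pat.length → pf.getD i 0 = pvPi (pat.take (i + 1))) :
    ∀ (v u : List Char), u.length + v.length ≤ pat.length →
      v.foldl (pvKmpStep pat pf) (Nat.findGreatest (fun k => pat.take k <:+ u) u.length)
        = Nat.findGreatest (fun k => pat.take k <:+ (u ++ v)) (u.length + v.length) := by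
  intro v
  induction v with
  | nil => intro u h; simp
  | cons c v ih =>
    intro u hlen
    simp only [List.length_cons] at hlen
    have hB : u.length < pat.length := by omega
    have hstep := pvKmpStep_findGreatest pat pf c u u.length hB (fun i hi => hpf i (by omega))
    simp only [List.foldl_cons]
    rw [hstep]
    have hih := ih (u ++ [c]) (by simp; omega)
    have h1 : u ++ [c] ++ v = u ++ c :: v := by simp
    have h2 : (u ++ [c]).length = u.length + 1 := by simp
    rw [h1, h2] at hih
    have h3 : u.length + 1 + v.length = u.length + (v.length + 1) := by omega
    rw [h3] at hih
    exact hih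

theorem pv_pi_succ (pat : List Char) (pf : List Nat) (i : Nat) (hi : i + 1 < pat.length)
    (hpf : ∀ j, j + 1 ≤ i → pf.getD j 0 = pvPi (pat.take (j + 1))) :
    pvKmpStep pat pf (pvPi (pat.take (i + 1))) (pat.getD (i + 1) ' ') = pvPi (pat.take (i + 2)) := by
  have hlen1 : (pat.take (i + 1)).length = i + 1 := by
    simp only [List.length_take]
    omega
  have hlen2 : (pat.take (i + 2)).length = i + 2 := by
    simp only [List.length_take]
    omega
  have h1 : pvPi (pat.take (i + 1))
      = Nat.findGreatest (fun k => pat.take k <:+ pat.take (i + 1)) i := by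
    unfold pvPi
    rw [hlen1, Nat.add_sub_cancel]
    apply pv_findGreatest_congr
    intro k hk
    rw [List.take_take, Nat.min_eq_left (by omega)]
  have hsnoc : pat.take (i + 2) = pat.take (i + 1) ++ [pat.getD (i + 1) ' '] := pv_take_snoc hi
  have h2 : pvPi (pat.take (i + 2))
      = Nat.findGreatest
          (fun k => pat.take k <:+ (pat.take (i + 1) ++ [pat.getD (i + 1) ' '])) (i + 1) := by
    unfold pvPi
    rw [hlen2]
    have hb : i + 2 - 1 = i + 1 := by omega
    rw [hb]
    apply pv_findGreatest_congr
    intro k hk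
    rw [List.take_take, Nat.min_eq_left (by omega), hsnoc]
  rw [h1, h2]
  exact pvKmpStep_findGreatest pat pf _ (pat.take (i + 1)) i (by omega) hpf

def pvPFfold (pat : List Char) (t : Nat) : List Nat × Nat :=
  (List.range t).foldl
    (fun st j =>
      let k := pvKmpStep pat st.1 st.2 (pat.getD (j + 1) ' ')
      (st.1 ++ [k], k))
    ([0], 0)

theorem pvPFfold_succ (pat : List Char) (t : Nat) :
    pvPFfold pat (t + 1) =
      ((pvPFfold pat t).1 ++ [pvKmpStep pat (pvPFfold pat t).1 (pvPFfold pat t).2 (pat.getD (t + 1) ' ')],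
       pvKmpStep pat (pvPFfold pat t).1 (pvPFfold pat t).2 (pat.getD (t + 1) ' ')) := by
  unfold pvPFfold
  rw [List.range_succ, List.foldl_append, List.foldl_cons, List.foldl_nil]

theorem pvPFfold_inv (pat : List Char) :
    ∀ t, t ≤ pat.length - 1 →
      (pvPFfold pat t).1.length = t + 1 ∧
      (pvPFfold pat t).2 = pvPi (pat.take (t + 1)) ∧
      ∀ i, i ≤ t → (pvPFfold pat t).1.getD i 0 = pvPi (pat.take (i + 1)) := by
  intro t
  induction t with
  | zero =>
    intro _
    have hpi1 : pvPi (pat.take 1) = 0 := by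
      unfold pvPi
      have hl : (pat.take 1).length - 1 = 0 := by
        simp only [List.length_take]
        omega
      rw [hl]
      rfl
    refine ⟨rfl, by simpa [pvPFfold] using hpi1.symm, ?_⟩
    intro i hi
    have hi0 : i = 0 := by omega
    rw [hi0]
    simpa [pvPFfold] using hpi1.symm
  | succ t ih =>
    intro ht
    obtain ⟨hlen, hst2, hget⟩ := ih (by omega)
    have hi : t + 1 < pat.length := by omega
    have hk : pvKmpStep pat (pvPFfold pat t).1 (pvPFfold pat t).2 (pat.getD (t + 1) ' ')
        = pvPi (pat.take (t + 2)) := by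
      rw [hst2]
      exact pv_pi_succ pat (pvPFfold pat t).1 t hi (fun j hj => hget j (by omega))
    rw [pvPFfold_succ, hk]
    refine ⟨by simp [hlen], rfl, ?_⟩
    intro i hile
    by_cases hit : i ≤ t
    · rw [List.getD_append _ _ _ _ (by omega)]
      exact hget i hit
    · have hieq : i = t + 1 := by omega
      rw [hieq, List.getD_append_right _ _ _ _ (by omega), hlen]
      simp

theorem pvBuildPF_spec (pat : List Char) :
    ∀ i, i < pat.length → (pvBuildPF pat).getD i 0 = pvPi (pat.take (i + 1)) := by
  intro i hi
  have heq : pvBuildPF pat = (pvPFfold pat (pat.length - 1)).1 := rfl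
  obtain ⟨_, _, hget⟩ := pvPFfold_inv pat (pat.length - 1) le_rfl
  rw [heq]
  exact hget i (by omega)

theorem pv_check_iff (p n : String) (k : Nat) (hk0 : 0 < k)
    (hkn : k ≤ n.toList.length) :
    (PySem.Str.slice p (some (-(k : Int))) none = PySem.Str.slice n none (some (k : Int)))
      ↔ n.toList.take k <:+ p.toList := by
  rw [← String.toList_inj, PySem.Str.toList_slice, PySem.Str.toList_slice,
    PySem.Chars.slice_eq_listSlice, PySem.Chars.slice_eq_listSlice,
    PySem.List.slice_from_neg_natCast _ k hk0, PySem.List.slice_to _ (by positivity)]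
  rw [Int.toNat_natCast]
  constructor
  · intro h
    rw [← h]
    exact List.drop_suffix _ _
  · intro h
    rw [List.suffix_iff_eq_drop, List.length_take, Nat.min_eq_left hkn] at h
    exact h.symm

theorem pvALoopNat (p n : String) :
    ∀ (k : Nat), (k : Int) ≤ min (PySem.Str.len p) (PySem.Str.len n) →
      pvALoop p n (k : Int) =
        (if 20 ≤ Nat.findGreatest (fun j => n.toList.take j <:+ p.toList) k
         then (Nat.findGreatest (fun j => n.toList.take j <:+ p.toList) k : Int) else 0) := by
  intro k
  induction k with
  | zero =>
    intro _
    rw [pvALoop]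
    norm_num
  | succ k ih =>
    intro hle
    rw [PySem.Str.len_eq, PySem.Str.len_eq, le_min_iff] at hle
    have hkp : k + 1 ≤ p.toList.length := by exact_mod_cast hle.1
    have hkn : k + 1 ≤ n.toList.length := by exact_mod_cast hle.2
    by_cases h20 : 20 ≤ k + 1
    · rw [pvALoop, if_pos (by exact_mod_cast h20)]
      rw [Nat.findGreatest_succ]
      by_cases hP : n.toList.take (k + 1) <:+ p.toList
      · rw [if_pos ((pv_check_iff p n (k + 1) (by omega) hkn).mpr hP), if_pos hP,
          if_pos (by exact_mod_cast h20)]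
      · rw [if_neg (fun hc => hP ((pv_check_iff p n (k + 1) (by omega) hkn).mp hc)),
          if_neg hP]
        have hcast : ((k : Int) + 1) - 1 = (k : Int) := by ring
        have hcast2 : ((k + 1 : Nat) : Int) - 1 = (k : Int) := by push_cast; ring
        rw [hcast2]
        apply ih
        rw [PySem.Str.len_eq, PySem.Str.len_eq, le_min_iff]
        constructor
        · exact_mod_cast Nat.le_of_succ_le hkp
        · exact_mod_cast Nat.le_of_succ_le hkn
    · rw [pvALoop, if_neg (by exact_mod_cast h20)]
      have : Nat.findGreatest (fun j => n.toList.take j <:+ p.toList) (k + 1) ≤ k + 1 :=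
        Nat.findGreatest_le _
      rw [if_neg (by omega)]

theorem pvALoop_eq (p n : String) (m : Int)
    (hm : m ≤ min (PySem.Str.len p) (PySem.Str.len n)) :
    pvALoop p n m =
      (if 20 ≤ Nat.findGreatest (fun k => n.toList.take k <:+ p.toList) m.toNat
       then (Nat.findGreatest (fun k => n.toList.take k <:+ p.toList) m.toNat : Int) else 0) := by
  by_cases h20 : 20 ≤ m
  · have hmeq : ((m.toNat : Nat) : Int) = m := Int.toNat_of_nonneg (by omega)
    rw [← hmeq]
    exact pvALoopNat p n m.toNat (by rw [hmeq]; exact hm)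
  · rw [pvALoop, if_neg h20]
    have h1 : Nat.findGreatest (fun k => n.toList.take k <:+ p.toList) m.toNat ≤ m.toNat :=
      Nat.findGreatest_le _
    have h2 : m.toNat ≤ 19 := by omega
    rw [if_neg (by omega)]

theorem pvOverlap_eq (p n : String) (m : Int)
    (hm : m ≤ min (PySem.Str.len p) (PySem.Str.len n)) :
    pvALoop p n m =
      (if 20 ≤ m then
        (if 20 ≤ (PySem.Str.slice p (some (PySem.Str.len p - m)) none).toList.foldl
              (pvKmpStep ((PySem.Str.slice n none (some m)).toList)
                (pvBuildPF ((PySem.Str.slice n none (some m)).toList))) 0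
        then (((PySem.Str.slice p (some (PySem.Str.len p - m)) none).toList.foldl
              (pvKmpStep ((PySem.Str.slice n none (some m)).toList)
                (pvBuildPF ((PySem.Str.slice n none (some m)).toList))) 0 : Nat) : Int)
        else 0)
       else 0) := by
  by_cases h20 : 20 ≤ m
  · rw [if_pos h20, pvALoop_eq p n m hm]
    rw [PySem.Str.len_eq, PySem.Str.len_eq, le_min_iff] at hm
    have hmp : m.toNat ≤ p.toList.length := by omega
    have hmn : m.toNat ≤ n.toList.length := by omega
    have hpat : (PySem.Str.slice n none (some m)).toList = n.toList.take m.toNat := by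
      rw [PySem.Str.toList_slice, PySem.Chars.slice_eq_listSlice,
        PySem.List.slice_to _ (by omega)]
    have htail : (PySem.Str.slice p (some (PySem.Str.len p - m)) none).toList
        = p.toList.drop (p.toList.length - m.toNat) := by
      rw [PySem.Str.toList_slice, PySem.Chars.slice_eq_listSlice, PySem.Str.len_eq,
        PySem.List.slice_from _ (by omega)]
      congr 1
      omega
    rw [hpat, htail]
    have hpatlen : (n.toList.take m.toNat).length = m.toNat := by
      simp only [List.length_take]
      omega
    have htllen : (p.toList.drop (p.toList.length - m.toNat)).length = m.toNat := by
      simp only [List.length_drop]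
      omega
    have hq : (p.toList.drop (p.toList.length - m.toNat)).foldl
        (pvKmpStep (n.toList.take m.toNat) (pvBuildPF (n.toList.take m.toNat))) 0
        = Nat.findGreatest (fun k => n.toList.take k <:+ p.toList) m.toNat := by
      have hscan := pvScan_foldl (n.toList.take m.toNat) (pvBuildPF (n.toList.take m.toNat))
        (pvBuildPF_spec _) (p.toList.drop (p.toList.length - m.toNat)) []
        (by simp only [List.length_nil, Nat.zero_add, htllen, hpatlen]; exact le_rfl)
      simp only [List.length_nil, Nat.findGreatest_zero, List.nil_append, Nat.zero_add] at hscan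
      rw [hscan, htllen]
      apply pv_findGreatest_congr
      intro k hk
      have htk : (n.toList.take m.toNat).take k = n.toList.take k := by
        rw [List.take_take, Nat.min_eq_left hk]
      rw [htk]
      constructor
      · intro h
        exact h.trans (List.drop_suffix _ _)
      · intro h
        refine pv_suffix_of_suffix_length_le h (List.drop_suffix _ _) ?_
        rw [htllen, List.length_take, Nat.min_eq_left (le_trans hk hmn)]
        exact hk
    rw [hq]
  · rw [if_neg h20, pvALoop, if_neg h20]

-- ===== VERDICT (by name: the statement is the Claim_ definition above) =====
theorem merge_without_overlap_py_spec : Claim_equal_merge_without_overlap_py := by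
  intro prev new mo _
  unfold Spec_merge_without_overlap_py
  simp only [merge_without_overlap_py, merge_without_overlap_py_alt]
  rw [pvOverlap_eq (PySem.Str.rstrip prev) (PySem.Str.strip new)
    (min (min (PySem.Str.len (PySem.Str.rstrip prev)) (PySem.Str.len (PySem.Str.strip new))) mo)
    (min_le_left _ _)]
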